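-- pv_equiv track=rewrite | github.com/MotWakorb/enhancedchannelmanager | backend/normalization_engine.py | _title_case_word
-- ===== SOURCE A (Python) =====
-- def _title_case_word(word: str, is_first: bool) -> str:
--     """
--     Title-case a word while handling apostrophes and special chars correctly.
--     Python's str.title() treats ' as a word boundary, turning '90s into '90S.
--     """
--     result = []
--     capitalize_next = True
--     for i, ch in enumerate(word):
--         if ch.isalpha():
--             if capitalize_next:
--                 result.append(ch.upper())
--                 capitalize_next = False
--             else:
--                 result.append(ch.lower())
--         else:
--             result.append(ch)
--             # Don't capitalize after apostrophes or digits
--             # Only capitalize after spaces (which won't appear here since we split on spaces)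
--     return ''.join(result)
-- ===== SOURCE B (Python) =====
-- def _title_case_word(word: str, is_first: bool) -> str:
--     """Title-case a word: find the first letter, uppercase it, lowercase the rest.
--
--     Digits and apostrophes are unaffected by .upper()/.lower(), so the
--     per-character state machine is unnecessary.
--     """
--     i = next((i for i, ch in enumerate(word) if ch.isalpha()), None)
--     if i is None:
--         return word
--     return word[:i] + word[i].upper() + word[i + 1:].lower()
-- ===== Notes on version B (the rewrite author's own statement) =====
-- stated objective: idiomatic
-- what changed: Replaces the per-character capitalize_next state machine with find-first-letter plus slicing: uppercase that letter and lowercase the tail with the library case methods.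
import Mathlib
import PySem

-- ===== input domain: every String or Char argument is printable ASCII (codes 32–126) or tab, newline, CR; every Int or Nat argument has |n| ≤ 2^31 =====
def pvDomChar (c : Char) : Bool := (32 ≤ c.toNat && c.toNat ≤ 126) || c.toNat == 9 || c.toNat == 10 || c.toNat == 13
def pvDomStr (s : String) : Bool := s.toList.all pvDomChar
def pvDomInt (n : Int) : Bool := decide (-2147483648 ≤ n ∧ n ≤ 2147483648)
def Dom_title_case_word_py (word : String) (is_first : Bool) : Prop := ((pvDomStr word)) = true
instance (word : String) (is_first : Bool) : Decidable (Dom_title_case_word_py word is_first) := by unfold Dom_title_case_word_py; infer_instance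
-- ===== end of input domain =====

-- B replaces A's per-character capitalize_next state machine with find-first-letter
-- plus slice/upper/lower library calls (idiomatic; same O(n) cost).


-- ===== PORT A =====
-- A's loop: structural recursion over the characters with the capitalize_next flag
def titleGoA : List Char → Bool → List Char
  | [], _ => []
  | ch :: rest, cap =>
    if PySem.Chars.isalpha ch then
      if cap then PySem.Chars.upperChar ch :: titleGoA rest false
      else PySem.Chars.lowerChar ch :: titleGoA rest cap
    else ch :: titleGoA rest cap

def title_case_word_py (word : String) (is_first : Bool) : String :=
  String.ofList (titleGoA word.toList true)

-- ===== PORT B =====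
def title_case_word_py_alt (word : String) (is_first : Bool) : String :=
  let cs := word.toList
  match cs.findIdx? (fun ch => PySem.Chars.isalpha ch) with
  | none => word
  | some i =>
      String.ofList (cs.take i ++ PySem.Chars.upper ((cs.drop i).take 1)
        ++ PySem.Chars.lower (cs.drop (i + 1)))

-- ===== PRECONDITION & SPEC =====
def Spec_title_case_word_py (word : String) (is_first : Bool) (out : String) : Prop := out = title_case_word_py_alt word is_first
instance (word : String) (is_first : Bool) (out : String) : Decidable (Spec_title_case_word_py word is_first out) := by unfold Spec_title_case_word_py; infer_instance

-- ===== CLAIM (what is proved, stated in full; the proofs are below) =====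
def Claim_equal_title_case_word_py : Prop := ∀ (word : String) (is_first : Bool), Dom_title_case_word_py word is_first → Spec_title_case_word_py word is_first (title_case_word_py word is_first)

-- ===== LEMMAS AND PROOFS =====

-- a non-letter is unchanged by lowerChar
theorem lowerChar_of_not_alpha (c : Char) (h : PySem.Chars.isalpha c = false) :
    PySem.Chars.lowerChar c = c := by
  simp [PySem.Chars.isalpha] at h
  simp [PySem.Chars.lowerChar, h.1]

-- with capitalize_next already cleared, A's loop is exactly str.lower
theorem titleGoA_false (cs : List Char) : titleGoA cs false = PySem.Chars.lower cs := by
  induction cs with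
  | nil => simp [titleGoA, PySem.Chars.lower]
  | cons ch rest ih =>
    by_cases h : PySem.Chars.isalpha ch = true
    · simp [titleGoA, h, ih, PySem.Chars.lower]
    · simp only [Bool.not_eq_true] at h
      simp [titleGoA, h, ih, PySem.Chars.lower, lowerChar_of_not_alpha ch h]

-- A's loop equals "copy up to the first letter, uppercase it, lowercase the rest"
theorem titleGoA_true (cs : List Char) :
    titleGoA cs true =
      match cs.findIdx? (fun ch => PySem.Chars.isalpha ch) with
      | none => cs
      | some i =>
          cs.take i ++ PySem.Chars.upper ((cs.drop i).take 1)
            ++ PySem.Chars.lower (cs.drop (i + 1)) := by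
  induction cs with
  | nil => simp [titleGoA]
  | cons ch rest ih =>
    by_cases h : PySem.Chars.isalpha ch = true
    · simp [titleGoA, h, List.findIdx?_cons, titleGoA_false, PySem.Chars.upper]
    · simp only [Bool.not_eq_true] at h
      simp only [titleGoA, h, if_false, List.findIdx?_cons, Bool.false_eq_true]
      rw [ih]
      cases hf : rest.findIdx? (fun ch => PySem.Chars.isalpha ch) with
      | none => simp
      | some i => simp [List.take_succ_cons]

-- ===== VERDICT (by name: the statement is the Claim_ definition above) =====
theorem title_case_word_py_spec : Claim_equal_title_case_word_py := by
  intro word is_first _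
  unfold Spec_title_case_word_py title_case_word_py title_case_word_py_alt
  rw [titleGoA_true]
  cases h : word.toList.findIdx? (fun ch => PySem.Chars.isalpha ch) with
  | none => simp [h]
  | some i => simp [h]
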